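-- pv_equiv track=rewrite | github.com/makkrnic/ppj_lab_g14 | lab2_GSA/racunaZapocinje.py | zapocinjeZaZnakove
-- ===== SOURCE A (Python) =====
-- def prazniZnakovi (produkcije):
--     listaPraznih = []
--     #dodajemo u listu praznih one znakove koji imaju s desne strane produkcije '$'
--     for lijevaStrana in produkcije.keys():
--         for desnaStrana in produkcije[lijevaStrana]:
--             if desnaStrana == ['$']:
--                 listaPraznih.append(lijevaStrana)
--                 break
--
--     #dodajemo u listu praznih one znakove kojima su svi znakovi desne strane prazni
--     while(1):
--         dodanoPraznih = 0
--         for lijevaStrana in produkcije.keys():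
--             jePrazan = 1
--             for desnaStrana in produkcije[lijevaStrana]:
--                 for znak in desnaStrana:
--                     if znak not in listaPraznih:
--                         jePrazan = 0
--                         break
--                 if (jePrazan == 1) and (lijevaStrana not in listaPraznih):
--                     listaPraznih.append(lijevaStrana)
--                     dodanoPraznih = 1
--                     break
--         if dodanoPraznih == 0:
--             break
--     return listaPraznih
--
-- def tablicaZapocinjeIzravnoZnakom (produkcije):
--     listaPraznih = prazniZnakovi(produkcije)
--     zapocinjeIzravnoZnakom = {}
--     #u rjecnik se dodaje (lijevaStrana, prviZnakDesneStrane) = 1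
--     #PONAVLJAJ: ako je taj znak prazan, onda se isto dodaje u rjecnik i za sljedeci znak
--     for lijevaStrana in produkcije.keys():
--         for desnaStrana in produkcije[lijevaStrana]:
--             for znak in desnaStrana:
--                 if znak != '$':
--                     zapocinjeIzravnoZnakom[(lijevaStrana,znak)] = 1
--                     if (znak not in listaPraznih):
--                         break
--     return  zapocinjeIzravnoZnakom
--
-- def tablicaZapocinjeZnakom(produkcije, sviZnakovi):
--     zapocinjeIzravnoZnakom = tablicaZapocinjeIzravnoZnakom(produkcije)
--     zapocinjeZnakom = {}
--     zapocinjeZnakom.update(zapocinjeIzravnoZnakom)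
--     #refleksivno i tranzitivno okruzenje rjecnika zapocinjeIzravnoZnakom
--     while (1):
--         dodanZapis = 0
--         for znak1 in sviZnakovi:
--             zapocinjeZnakom[(znak1,znak1)] = 1
--             for znak2 in sviZnakovi:
--                 for znak3 in sviZnakovi:
--                     if zapocinjeZnakom.get((znak1,znak2)) == 1 and zapocinjeZnakom.get((znak2,znak3)) == 1:
--                         if zapocinjeZnakom.get((znak1,znak3)) == None:
--                             zapocinjeZnakom[(znak1,znak3)] = 1
--                             dodanZapis = 1
--         if dodanZapis == 0:
--             break
--     return zapocinjeZnakom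
--
-- def zapocinjeZaZnakove(produkcije, nezavrsniZnakovi, zavrsniZnakovi, pocetniZnak):
--     sviZnakovi = nezavrsniZnakovi + zavrsniZnakovi + ['$'] + [pocetniZnak]
--     zapocinjeZnakom = tablicaZapocinjeZnakom(produkcije, sviZnakovi)
--     zapocinjeSkupovi = {}   #{znak:[lista zavrsnih znakova]}
--     #redak tablice tablicaZapocinjeZnakom je skup zapocinje za pripadajuci znak
--     for znak1 in sviZnakovi:
--         zapocinjeSkupovi[znak1] = []
--         for znak2 in zavrsniZnakovi:
--             if zapocinjeZnakom.get((znak1,znak2)) == 1: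
--                 zapocinjeSkupovi[znak1].append(znak2)
--     return zapocinjeSkupovi
-- ===== SOURCE B (Python) =====
-- def _nullablePrefix(core, prazni):
--     # symbols of core up to and including the first non-nullable one
--     for i, z in enumerate(core):
--         if z not in prazni:
--             return core[:i + 1]
--     return core
--
-- def zapocinjeZaZnakove(produkcije, nezavrsniZnakovi, zavrsniZnakovi, pocetniZnak):
--     svi = nezavrsniZnakovi + zavrsniZnakovi + ['$'] + [pocetniZnak]
--     svis = set(svi)
--     # nullable symbols, by round-based fixpoint iteration (first-RHS rule, as in this module)
--     prazni = {L for L, rhss in produkcije.items() if ['$'] in rhss}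
--     for _ in range(len(produkcije)):
--         prazni = prazni | {L for L, rhss in produkcije.items()
--                            if rhss and all(z in prazni for z in rhss[0])}
--     # direct 'begins with' edges
--     edges = {(L, z) for L, rhss in produkcije.items()
--                     for rhs in rhss
--                     for z in _nullablePrefix([y for y in rhs if y != '$'], prazni)}
--     edges = {(a, b) for (a, b) in edges if a in svis and b in svis}
--     # per-symbol reachability by bounded round expansion
--     n = len(svis)
--     out = {}
--     for s in svi:
--         reach = {s}
--         for _ in range(n):
--             reach = reach | {b for (a, b) in edges if a in reach}
--         out[s] = [t for t in zavrsniZnakovi if t in reach]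
--     return out
-- ===== Notes on version B (the rewrite author's own statement) =====
-- stated objective: faster
-- what changed: A saturates a global pair-dictionary with repeated quartic reflexive-transitive passes until a full pass adds nothing; B builds the nullable set and the direct 'begins-with' edge set once, then computes each symbol's reachable terminal set by bounded-round set expansion over those edges, never touching a pair table.
import Mathlib
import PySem

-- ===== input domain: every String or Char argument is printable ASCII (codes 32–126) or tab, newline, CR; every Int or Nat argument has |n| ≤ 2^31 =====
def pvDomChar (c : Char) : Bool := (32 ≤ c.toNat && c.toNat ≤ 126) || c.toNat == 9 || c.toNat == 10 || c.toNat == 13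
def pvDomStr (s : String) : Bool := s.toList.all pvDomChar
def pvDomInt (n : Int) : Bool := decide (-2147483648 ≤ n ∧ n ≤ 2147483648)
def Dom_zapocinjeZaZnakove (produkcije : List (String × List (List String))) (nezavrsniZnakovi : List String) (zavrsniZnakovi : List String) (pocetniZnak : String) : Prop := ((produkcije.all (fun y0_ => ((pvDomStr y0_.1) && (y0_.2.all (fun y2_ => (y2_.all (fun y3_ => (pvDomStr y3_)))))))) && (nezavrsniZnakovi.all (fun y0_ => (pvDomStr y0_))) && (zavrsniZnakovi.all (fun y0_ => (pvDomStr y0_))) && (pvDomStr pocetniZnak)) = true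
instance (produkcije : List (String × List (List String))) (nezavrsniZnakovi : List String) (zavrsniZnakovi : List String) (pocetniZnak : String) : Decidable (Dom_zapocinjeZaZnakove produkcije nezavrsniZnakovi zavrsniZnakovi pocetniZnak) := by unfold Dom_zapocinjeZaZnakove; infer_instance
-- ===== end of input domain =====

-- B replaces A's repeated quartic saturation passes over the symbol list by per-symbol
-- bounded-round set reachability over a direct-edge set built once (objective: faster).

-- ===== PORT A =====
-- prazniZnakovi: first pass ('$'-productions), then while(1) saturation passes
def pvPrazniBase (P : PySem.Dict String (List (List String))) : List String :=
  P.keys.foldl (fun lista L =>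
    if (P.getD L []).any (fun ds => ds == ["$"]) then lista ++ [L] else lista) []

def pvPrazniInner (L : String) : List (List String) → List String → Bool → List String × Bool
  | [], lista, _ => (lista, false)
  | ds :: rest, lista, jePrazan =>
    let jp := jePrazan && ds.all (fun z => lista.contains z)
    if jp && !(lista.contains L) then (lista ++ [L], true)
    else pvPrazniInner L rest lista jp

def pvPrazniPass (P : PySem.Dict String (List (List String))) (st : List String × Bool) : List String × Bool :=
  P.keys.foldl (fun st L =>
    let r := pvPrazniInner L (P.getD L []) st.1 true
    (r.1, st.2 || r.2)) st

def pvPrazniLoop (P : PySem.Dict String (List (List String))) : Nat → List String → List String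
  | 0, lista => lista
  | fuel+1, lista =>
    let r := pvPrazniPass P (lista, false)
    if r.2 then pvPrazniLoop P fuel r.1 else r.1

def pvPrazniZnakovi (P : PySem.Dict String (List (List String))) : List String :=
  pvPrazniLoop P (P.keys.length + 1) (pvPrazniBase P)

-- tablicaZapocinjeIzravnoZnakom
def pvIzravnoInner (L : String) (prazni : List String) : List String → PySem.Dict (String × String) Int → PySem.Dict (String × String) Int
  | [], d => d
  | z :: rest, d =>
    if z != "$" then
      let d' := d.insert (L, z) 1
      if !(prazni.contains z) then d' else pvIzravnoInner L prazni rest d'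
    else pvIzravnoInner L prazni rest d

def pvIzravno (P : PySem.Dict String (List (List String))) : PySem.Dict (String × String) Int :=
  let prazni := pvPrazniZnakovi P
  P.keys.foldl (fun d L => (P.getD L []).foldl (fun d ds => pvIzravnoInner L prazni ds d) d) PySem.Dict.empty

-- tablicaZapocinjeZnakom: while(1) reflexive/transitive saturation (fuel = loop bound)
def pvClosurePass (svi : List String) (st : PySem.Dict (String × String) Int × Bool) : PySem.Dict (String × String) Int × Bool :=
  svi.foldl (fun st z1 =>
    let st1 := (st.1.insert (z1, z1) 1, st.2)
    svi.foldl (fun st z2 =>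
      svi.foldl (fun st z3 =>
        if st.1.get? (z1, z2) == some 1 && st.1.get? (z2, z3) == some 1 then
          if st.1.get? (z1, z3) == none then (st.1.insert (z1, z3) 1, true) else st
        else st) st) st1) st

def pvClosureLoop (svi : List String) : Nat → PySem.Dict (String × String) Int → PySem.Dict (String × String) Int
  | 0, d => d
  | fuel+1, d =>
    let r := pvClosurePass svi (d, false)
    if r.2 then pvClosureLoop svi fuel r.1 else r.1

def pvTablicaZapocinje (P : PySem.Dict String (List (List String))) (svi : List String) : PySem.Dict (String × String) Int :=
  let izravno := pvIzravno P
  let zz := PySem.Dict.update PySem.Dict.empty izravno.items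
  pvClosureLoop svi (izravno.keys.length + svi.length * svi.length + 1) zz

def zapocinjeZaZnakove (produkcije : List (String × List (List String))) (nezavrsniZnakovi : List String) (zavrsniZnakovi : List String) (pocetniZnak : String) : List (String × List String) :=
  let svi := nezavrsniZnakovi ++ zavrsniZnakovi ++ ["$"] ++ [pocetniZnak]
  let P := PySem.Dict.ofList produkcije
  let zz := pvTablicaZapocinje P svi
  (svi.foldl (fun out z1 =>
    out.insert z1 (zavrsniZnakovi.foldl (fun acc z2 =>
      if zz.get? (z1, z2) == some 1 then acc ++ [z2] else acc) [])) PySem.Dict.empty).items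

-- ===== PORT B =====
def pvNullablePrefix (prazni : PySem.Set String) : List String → List String
  | [] => []
  | z :: rest => if !(PySem.Set.contains prazni z) then [z] else z :: pvNullablePrefix prazni rest

def pvPrazniAlt (items : List (String × List (List String))) : PySem.Set String :=
  let base := PySem.Set.ofList ((items.filter (fun p => p.2.contains ["$"])).map (·.1))
  (List.range items.length).foldl (fun prazni _ =>
    PySem.Set.union prazni
      ((items.filter (fun p => match p.2 with
          | [] => false
          | r :: _ => r.all (fun z => prazni.contains z))).map (·.1))) base

def pvEdges (items : List (String × List (List String))) (prazni : PySem.Set String) : PySem.Set (String × String) :=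
  PySem.Set.ofList (items.flatMap (fun p => p.2.flatMap (fun rhs =>
    (pvNullablePrefix prazni (rhs.filter (fun y => y != "$"))).map (fun z => (p.1, z)))))

def pvReach (edges2 : PySem.Set (String × String)) (n : Nat) (s : String) : PySem.Set String :=
  (List.range n).foldl (fun reach _ =>
    PySem.Set.union reach ((edges2.filter (fun e => reach.contains e.1)).map (·.2))) (PySem.Set.ofList [s])

def zapocinjeZaZnakove_alt (produkcije : List (String × List (List String))) (nezavrsniZnakovi : List String) (zavrsniZnakovi : List String) (pocetniZnak : String) : List (String × List String) :=
  let svi := nezavrsniZnakovi ++ zavrsniZnakovi ++ ["$"] ++ [pocetniZnak]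
  let svis := PySem.Set.ofList svi
  let items := (PySem.Dict.ofList produkcije).items
  let prazni := pvPrazniAlt items
  let edges := pvEdges items prazni
  let edges2 : PySem.Set (String × String) :=
    PySem.Set.ofList (edges.filter (fun e => svis.contains e.1 && svis.contains e.2))
  let n := svis.length
  (svi.foldl (fun out s =>
    out.insert s (zavrsniZnakovi.filter (fun t => (pvReach edges2 n s).contains t))) PySem.Dict.empty).items

-- ===== PRECONDITION & SPEC =====
def Spec_zapocinjeZaZnakove (produkcije : List (String × List (List String))) (nezavrsniZnakovi : List String) (zavrsniZnakovi : List String) (pocetniZnak : String) (out : List (String × List String)) : Prop := out = zapocinjeZaZnakove_alt produkcije nezavrsniZnakovi zavrsniZnakovi pocetniZnak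
instance (produkcije : List (String × List (List String))) (nezavrsniZnakovi : List String) (zavrsniZnakovi : List String) (pocetniZnak : String) (out : List (String × List String)) : Decidable (Spec_zapocinjeZaZnakove produkcije nezavrsniZnakovi zavrsniZnakovi pocetniZnak out) := by unfold Spec_zapocinjeZaZnakove; infer_instance

-- ===== CLAIM (what is proved, stated in full; the proofs are below) =====
def Claim_equal_zapocinjeZaZnakove : Prop := ∀ (produkcije : List (String × List (List String))) (nezavrsniZnakovi : List String) (zavrsniZnakovi : List String) (pocetniZnak : String), Dom_zapocinjeZaZnakove produkcije nezavrsniZnakovi zavrsniZnakovi pocetniZnak → Spec_zapocinjeZaZnakove produkcije nezavrsniZnakovi zavrsniZnakovi pocetniZnak (zapocinjeZaZnakove produkcije nezavrsniZnakovi zavrsniZnakovi pocetniZnak)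

-- ===== LEMMAS AND PROOFS =====

-- semantic characterisations shared by both proofs
inductive NullE (P : PySem.Dict String (List (List String))) : String → Prop
  | dollar (L : String) (h : ["$"] ∈ P.getD L []) : NullE P L
  | first (L : String) (r : List String) (rest : List (List String))
      (h : P.getD L [] = r :: rest) (hr : ∀ z ∈ r, NullE P z) : NullE P L

-- the symbols A's inner direct-table walk emits from one right-hand side
def pvEmit (ν : String → Bool) : List String → List String
  | [] => []
  | z :: rest => if z == "$" then pvEmit ν rest else z :: (if ν z then pvEmit ν rest else [])

def DirP (P : PySem.Dict String (List (List String))) (ν : String → Bool) (a b : String) : Prop :=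
  ∃ rhs ∈ P.getD a [], b ∈ pvEmit ν rhs

def StepR (P : PySem.Dict String (List (List String))) (ν : String → Bool) (svi : List String) (a b : String) : Prop :=
  a ∈ svi ∧ b ∈ svi ∧ DirP P ν a b

def ReachR (P : PySem.Dict String (List (List String))) (ν : String → Bool) (svi : List String) : String → String → Prop :=
  Relation.ReflTransGen (StepR P ν svi)

abbrev PVD := PySem.Dict String (List (List String))

-- pigeonhole: a duplicate-free list has no more elements than any list containing it
lemma pvNodupLen {α : Type} [DecidableEq α] {l l' : List α} (h : l.Nodup) (hs : l ⊆ l') :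
    l.length ≤ l'.length := by
  calc l.length = l.toFinset.card := (List.toFinset_card_of_nodup h).symm
    _ ≤ l'.toFinset.card := Finset.card_le_card (fun x hx => List.mem_toFinset.2 (hs (List.mem_toFinset.1 hx)))
    _ ≤ l'.length := l'.toFinset_card_le

-- ---- A side: prazniZnakovi ----
lemma pvInner_flag (L : String) : ∀ (rhss : List (List String)) (lista : List String) (jp : Bool),
    (pvPrazniInner L rhss lista jp).2 = true → jp = true := by
  intro rhss
  induction rhss with
  | nil => intro lista jp h; simp [pvPrazniInner] at h
  | cons ds rest ih =>
    intro lista jp h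
    simp only [pvPrazniInner] at h
    split at h
    · rename_i hc
      simp at hc
      exact hc.1.1
    · have := ih lista _ h
      simp at this
      exact this.1

lemma pvInner_cases (L : String) : ∀ (rhss : List (List String)) (lista : List String) (jp : Bool),
    pvPrazniInner L rhss lista jp = (lista, false) ∨
      (pvPrazniInner L rhss lista jp = (lista ++ [L], true) ∧ lista.contains L = false) := by
  intro rhss
  induction rhss with
  | nil => intro lista jp; left; simp [pvPrazniInner]
  | cons ds rest ih =>
    intro lista jp
    simp only [pvPrazniInner]
    split
    · rename_i hc
      simp at hc
      right; exact ⟨rfl, by simpa using hc.2⟩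
    · exact ih lista _

lemma pvInner_first (L : String) (r : List String) (rest : List (List String)) (lista : List String)
    (h : (pvPrazniInner L (r :: rest) lista true).2 = true) : ∀ z ∈ r, z ∈ lista := by
  simp only [pvPrazniInner] at h
  intro z hz
  split at h
  · rename_i hc
    simp at hc
    exact hc.1 z hz
  · have hjp := pvInner_flag L rest lista _ h
    simp at hjp
    exact hjp z hz


def pvPassF (P : PVD) (ks : List String) (st : List String × Bool) : List String × Bool :=
  ks.foldl (fun st L =>
    let r := pvPrazniInner L (P.getD L []) st.1 true
    (r.1, st.2 || r.2)) st

lemma pvPrazniPass_eq (P : PVD) (st : List String × Bool) : pvPrazniPass P st = pvPassF P P.keys st := rfl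

lemma pvPassF_cons (P : PVD) (L : String) (ks : List String) (st : List String × Bool) :
    pvPassF P (L :: ks) st =
      pvPassF P ks ((pvPrazniInner L (P.getD L []) st.1 true).1,
        st.2 || (pvPrazniInner L (P.getD L []) st.1 true).2) := rfl

lemma pvPassF_prefix (P : PVD) : ∀ (ks : List String) (st : List String × Bool),
    st.1 <+: (pvPassF P ks st).1 := by
  intro ks
  induction ks with
  | nil => intro st; exact List.prefix_rfl
  | cons L ks ih =>
    intro st
    rw [pvPassF_cons]
    rcases pvInner_cases L (P.getD L []) st.1 true with hc | hc
    · rw [hc]; dsimp only; exact ih (st.1, st.2 || false)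
    · rw [hc.1]; dsimp only
      exact List.IsPrefix.trans (List.prefix_append _ _) (ih (st.1 ++ [L], st.2 || true))

lemma pvPassF_flagmono (P : PVD) : ∀ (ks : List String) (st : List String × Bool),
    st.2 = true → (pvPassF P ks st).2 = true := by
  intro ks
  induction ks with
  | nil => intro st h; exact h
  | cons L ks ih =>
    intro st h
    rw [pvPassF_cons]
    exact ih _ (by simp [h])

lemma pvPassF_flagfalse (P : PVD) : ∀ (ks : List String) (st : List String × Bool),
    (pvPassF P ks st).2 = false → (pvPassF P ks st).1 = st.1 ∧ st.2 = false := by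
  intro ks
  induction ks with
  | nil => intro st h; exact ⟨rfl, h⟩
  | cons L ks ih =>
    intro st h
    rw [pvPassF_cons] at h ⊢
    rcases pvInner_cases L (P.getD L []) st.1 true with hc | hc
    · rw [hc] at h ⊢
      dsimp only at h ⊢
      have hih := ih _ h
      refine ⟨hih.1, ?_⟩
      simpa using hih.2
    · exfalso
      rw [hc.1] at h
      dsimp only at h
      have := pvPassF_flagmono P ks (st.1 ++ [L], st.2 || true) (by simp)
      rw [this] at h
      exact absurd h (by simp)

lemma pvPassF_growth (P : PVD) : ∀ (ks : List String) (st : List String × Bool),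
    st.1.length ≤ (pvPassF P ks st).1.length ∧
      ((pvPassF P ks st).2 = true → st.2 = true ∨ st.1.length < (pvPassF P ks st).1.length) := by
  intro ks
  induction ks with
  | nil => intro st; exact ⟨le_rfl, fun h => Or.inl h⟩
  | cons L ks ih =>
    intro st
    rw [pvPassF_cons]
    rcases pvInner_cases L (P.getD L []) st.1 true with hc | hc
    · rw [hc]
      dsimp only
      have hih := ih ((st.1 : List String), st.2 || false)
      refine ⟨hih.1, fun h => ?_⟩
      rcases hih.2 h with h2 | h2
      · exact Or.inl (by simpa using h2)
      · exact Or.inr h2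
    · rw [hc.1]
      dsimp only
      have hih := ih ((st.1 ++ [L] : List String), st.2 || true)
      refine ⟨le_trans (by simp) hih.1, fun _ => Or.inr ?_⟩
      have h3 : st.1.length < (st.1 ++ [L]).length := by simp
      have h4 := hih.1
      simp only at h4
      omega

lemma pvPassF_nodup_sub (P : PVD) : ∀ (ks : List String) (st : List String × Bool),
    st.1.Nodup → (pvPassF P ks st).1.Nodup ∧ ∀ x ∈ (pvPassF P ks st).1, x ∈ st.1 ∨ x ∈ ks := by
  intro ks
  induction ks with
  | nil => intro st h; exact ⟨h, fun x hx => Or.inl hx⟩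
  | cons L ks ih =>
    intro st h
    rw [pvPassF_cons]
    rcases pvInner_cases L (P.getD L []) st.1 true with hc | hc
    · rw [hc]
      dsimp only
      have hih := ih ((st.1 : List String), st.2 || false) h
      exact ⟨hih.1, fun x hx => (hih.2 x hx).elim Or.inl (fun h2 => Or.inr (List.mem_cons_of_mem _ h2))⟩
    · rw [hc.1]
      dsimp only
      have hL : L ∉ st.1 := by
        intro hm
        have hc2 := hc.2
        simp at hc2
        exact hc2 hm
      have hnd : (st.1 ++ [L]).Nodup := by
        simp [List.nodup_append, h]
        exact fun a ha he => hL (he ▸ ha)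
      have hih := ih ((st.1 ++ [L] : List String), st.2 || true) hnd
      refine ⟨hih.1, fun x hx => ?_⟩
      rcases hih.2 x hx with h2 | h2
      · rcases List.mem_append.1 h2 with h3 | h3
        · exact Or.inl h3
        · simp at h3; exact Or.inr (by simp [h3])
      · exact Or.inr (List.mem_cons_of_mem _ h2)

lemma pvPassF_sound (P : PVD) : ∀ (ks : List String) (st : List String × Bool),
    (∀ x ∈ st.1, NullE P x) → ∀ x ∈ (pvPassF P ks st).1, NullE P x := by
  intro ks
  induction ks with
  | nil => intro st h; exact h
  | cons L ks ih =>
    intro st h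
    rw [pvPassF_cons]
    rcases pvInner_cases L (P.getD L []) st.1 true with hc | hc
    · rw [hc]; dsimp only; exact ih _ h
    · rw [hc.1]; dsimp only
      refine ih _ ?_
      intro x hx
      simp only at hx
      rcases List.mem_append.1 hx with h3 | h3
      · exact h x h3
      · simp at h3
        subst h3
        have hne : P.getD x [] ≠ [] := by
          intro he
          have hc1 := hc.1
          rw [he] at hc1
          simp [pvPrazniInner] at hc1
        obtain ⟨r0, rest, hrhss⟩ := List.exists_cons_of_ne_nil hne
        have hflag : (pvPrazniInner x (r0 :: rest) st.1 true).2 = true := by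
          rw [← hrhss, hc.1]
        have hall := pvInner_first x r0 rest st.1 hflag
        exact NullE.first x r0 rest hrhss (fun z hz => h z (hall z hz))

lemma pvPassF_closed (P : PVD) : ∀ (ks : List String) (lista : List String),
    (pvPassF P ks (lista, false)).2 = false →
    ∀ L ∈ ks, ∀ r0 rest, P.getD L [] = r0 :: rest → (∀ z ∈ r0, z ∈ lista) → L ∈ lista := by
  intro ks
  induction ks with
  | nil => intro lista _ L hL; simp at hL
  | cons L0 ks ih =>
    intro lista hfl L hL r0 rest hrhss hall
    rw [pvPassF_cons] at hfl
    rcases pvInner_cases L0 (P.getD L0 []) lista true with hc | hc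
    · rw [hc] at hfl
      dsimp only at hfl
      have hfl2 : (pvPassF P ks (lista, false)).2 = false := by simpa using hfl
      rcases List.mem_cons.1 hL with h1 | h1
      · subst h1
        by_contra hnot
        have hc1 := hc
        rw [hrhss] at hc1
        simp only [pvPrazniInner] at hc1
        have hcond : ((true && r0.all (fun z => lista.contains z)) && !(lista.contains L)) = true := by
          simp
          exact ⟨hall, hnot⟩
        rw [if_pos hcond] at hc1
        have := congrArg Prod.snd hc1
        simp at this
      · exact ih lista hfl2 L h1 r0 rest hrhss hall
    · exfalso
      rw [hc.1] at hfl
      dsimp only at hfl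
      have := pvPassF_flagmono P ks ((lista ++ [L0] : List String), false || true) (by simp)
      rw [this] at hfl
      exact absurd hfl (by simp)

lemma pvLoop_spec (P : PVD) : ∀ (fuel : Nat) (lista : List String),
    lista.Nodup → lista ⊆ P.keys → (∀ x ∈ lista, NullE P x) →
    P.keys.length + 1 ≤ fuel + lista.length →
    lista ⊆ pvPrazniLoop P fuel lista ∧ (∀ x ∈ pvPrazniLoop P fuel lista, NullE P x) ∧
      pvPrazniPass P (pvPrazniLoop P fuel lista, false) = (pvPrazniLoop P fuel lista, false) := by
  intro fuel
  induction fuel with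
  | zero =>
    intro lista hnd hsub _ hfuel
    exfalso
    have := pvNodupLen hnd hsub
    omega
  | succ fuel ih =>
    intro lista hnd hsub hnull hfuel
    show _ ∧ _
    rw [pvPrazniLoop]
    by_cases hf : (pvPrazniPass P (lista, false)).2 = true
    · simp only [hf, if_true]
      have hpre := pvPassF_prefix P P.keys (lista, false)
      rw [← pvPrazniPass_eq] at hpre
      have hns := pvPassF_nodup_sub P P.keys (lista, false) hnd
      rw [← pvPrazniPass_eq] at hns
      have hgr := pvPassF_growth P P.keys (lista, false)
      rw [← pvPrazniPass_eq] at hgr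
      have hsnd := pvPassF_sound P P.keys (lista, false) hnull
      rw [← pvPrazniPass_eq] at hsnd
      have hsub2 : (pvPrazniPass P (lista, false)).1 ⊆ P.keys := by
        intro x hx
        rcases hns.2 x hx with h1 | h1
        · exact hsub h1
        · exact h1
      have hlen : lista.length < (pvPrazniPass P (lista, false)).1.length := by
        rcases hgr.2 hf with h1 | h1
        · exact absurd h1 (by simp)
        · exact h1
      have hih := ih (pvPrazniPass P (lista, false)).1 hns.1 hsub2 hsnd (by omega)
      exact ⟨fun x hx => hih.1 (hpre.subset hx), hih.2.1, hih.2.2⟩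
    · rw [Bool.not_eq_true] at hf
      simp only [hf, Bool.false_eq_true, if_false]
      have hff := pvPassF_flagfalse P P.keys (lista, false) (by rw [← pvPrazniPass_eq]; exact hf)
      rw [← pvPrazniPass_eq] at hff
      have hff1 : (pvPrazniPass P (lista, false)).1 = lista := hff.1
      rw [hff1]
      exact ⟨fun x hx => hx, hnull, Prod.ext hff1 hf⟩

lemma pvBase_eq (P : PVD) :
    pvPrazniBase P = P.keys.filter (fun L => (P.getD L []).any (fun ds => ds == ["$"])) := by
  unfold pvPrazniBase
  simpa using PySem.List.foldl_append_if_eq_filter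
    (fun L => (P.getD L []).any (fun ds => ds == ["$"])) P.keys []

lemma pvGetD_ne_nil_mem_keys (P : PVD) (L : String) (h : P.getD L [] ≠ []) : L ∈ P.keys := by
  rcases hg : P.get? L with _ | v
  · exfalso
    apply h
    simp [PySem.Dict.getD_eq_get?_getD, hg]
  · have : P.contains L = true := by
      rw [PySem.Dict.contains_eq_isSome_get?, hg]; rfl
    exact (PySem.Dict.contains_iff_mem_keys P L).1 this

theorem pvPrazniA_iff (P : PVD) (hnd : P.keys.Nodup) (z : String) :
    z ∈ pvPrazniZnakovi P ↔ NullE P z := by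
  have hbase := pvBase_eq P
  have hbnd : (pvPrazniBase P).Nodup := by rw [hbase]; exact hnd.filter _
  have hbsub : pvPrazniBase P ⊆ P.keys := by
    rw [hbase]; exact fun x hx => (List.mem_filter.1 hx).1
  have hbnull : ∀ x ∈ pvPrazniBase P, NullE P x := by
    intro x hx
    rw [hbase, List.mem_filter] at hx
    have := hx.2
    simp at this
    exact NullE.dollar x this
  have hspec := pvLoop_spec P (P.keys.length + 1) (pvPrazniBase P) hbnd hbsub hbnull (by omega)
  rw [show pvPrazniLoop P (P.keys.length + 1) (pvPrazniBase P) = pvPrazniZnakovi P from rfl] at hspec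
  constructor
  · exact fun h => hspec.2.1 z h
  · intro hne
    induction hne with
    | dollar L h =>
      apply hspec.1
      rw [hbase, List.mem_filter]
      refine ⟨pvGetD_ne_nil_mem_keys P L (by intro he; rw [he] at h; simp at h), ?_⟩
      simp
      exact h
    | first L r rest h hr ihr =>
      have hclosed := pvPassF_closed P P.keys (pvPrazniZnakovi P)
        (by rw [← pvPrazniPass_eq, hspec.2.2])
      exact hclosed L (pvGetD_ne_nil_mem_keys P L (by rw [h]; simp)) r rest h ihr

-- ---- generic bounded-round fixpoint machinery (used by the B side) ----
lemma pvSet_prefix_update {α : Type} [BEq α] : ∀ (xs : List α) (s : PySem.Set α),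
    s <+: PySem.Set.update s xs := by
  intro xs
  induction xs with
  | nil => intro s; exact List.prefix_rfl
  | cons x xs ih =>
    intro s
    have h1 : s <+: PySem.Set.add s x := by
      unfold PySem.Set.add
      split
      · exact List.prefix_rfl
      · exact List.prefix_append _ _
    exact h1.trans (ih (PySem.Set.add s x))

lemma pvRangeFold {α : Type} (f : α → α) : ∀ (n : Nat) (S : α),
    (List.range n).foldl (fun s _ => f s) S = f^[n] S := by
  intro n
  induction n with
  | zero => intro S; rfl
  | succ n ih =>
    intro S
    rw [List.range_succ, List.foldl_append, ih, Function.iterate_succ_apply']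
    rfl

lemma pvRounds_spec {α : Type} [BEq α] [LawfulBEq α] [DecidableEq α] (f : PySem.Set α → PySem.Set α) (U : List α)
    (hpre : ∀ S, S <+: f S) (hnd : ∀ S, S.Nodup → (f S).Nodup) (hbd : ∀ S, S ⊆ U → f S ⊆ U)
    (Inv : PySem.Set α → Prop) (hInv : ∀ S, Inv S → Inv (f S)) :
    ∀ (n : Nat) (S : PySem.Set α), S.Nodup → S ⊆ U → Inv S → U.length ≤ n + S.length →
      S ⊆ f^[n] S ∧ (f^[n] S).Nodup ∧ f^[n] S ⊆ U ∧ Inv (f^[n] S) ∧ f (f^[n] S) = f^[n] S := by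
  intro n
  induction n with
  | zero =>
    intro S hS hsub hinv hlen
    have hfx : f S = S := by
      have h1 : (f S).length ≤ U.length := pvNodupLen (hnd S hS) (hbd S hsub)
      have h2 : S.length ≤ (f S).length := (hpre S).length_le
      exact ((hpre S).eq_of_length (by omega)).symm
    have h0 : f^[0] S = S := rfl
    rw [h0]
    exact ⟨fun x hx => hx, hS, hsub, hinv, hfx⟩
  | succ n ih =>
    intro S hS hsub hinv hlen
    by_cases hfx : f S = S
    · rw [Function.iterate_fixed hfx]
      exact ⟨fun x hx => hx, hS, hsub, hinv, hfx⟩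
    · rw [Function.iterate_succ_apply]
      have hlt : S.length < (f S).length := by
        have h2 := (hpre S).length_le
        rcases lt_or_eq_of_le h2 with h3 | h3
        · exact h3
        · exact absurd ((hpre S).eq_of_length h3).symm hfx
      have hih := ih (f S) (hnd S hS) (hbd S hsub) (hInv S hinv) (by omega)
      exact ⟨fun x hx => hih.1 ((hpre S).subset hx), hih.2.1, hih.2.2.1, hih.2.2.2⟩

-- ---- B side: pvPrazniAlt computes the same nullable set ----
lemma pvAltF_eq (items : List (String × List (List String))) :
    pvPrazniAlt items =
      (fun S => PySem.Set.union S ((items.filter (fun p => match p.2 with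
          | [] => false
          | r :: _ => r.all (fun z => S.contains z))).map (·.1)))^[items.length]
        (PySem.Set.ofList ((items.filter (fun p => p.2.contains ["$"])).map (·.1))) := by
  unfold pvPrazniAlt
  rw [pvRangeFold]

theorem pvPrazniB_iff (P : PVD) (hnd : P.keys.Nodup) (z : String) :
    z ∈ pvPrazniAlt P.items ↔ NullE P z := by
  set expand := fun (S : PySem.Set String) => ((P.items.filter (fun p => match p.2 with
      | [] => false
      | r :: _ => r.all (fun z => S.contains z))).map (·.1)) with hexp
  set f := fun (S : PySem.Set String) => PySem.Set.union S (expand S) with hf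
  set base := PySem.Set.ofList ((P.items.filter (fun p => p.2.contains ["$"])).map (·.1)) with hbase
  have heq : pvPrazniAlt P.items = f^[P.items.length] base := pvAltF_eq P.items
  have hexpand_sub : ∀ S, expand S ⊆ P.keys := by
    intro S x hx
    rw [hexp] at hx
    obtain ⟨p, hp, hpe⟩ := List.mem_map.1 hx
    exact hpe ▸ List.mem_map.2 ⟨p, (List.mem_filter.1 hp).1, rfl⟩
  have hexpand_null : ∀ S, (∀ x ∈ S, NullE P x) → ∀ x ∈ expand S, NullE P x := by
    intro S hS x hx
    rw [hexp] at hx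
    obtain ⟨p, hp, hpe⟩ := List.mem_map.1 hx
    obtain ⟨hpi, hpf⟩ := List.mem_filter.1 hp
    rcases hp2 : p.2 with _ | ⟨r, rest⟩
    · rw [hp2] at hpf; simp at hpf
    · rw [hp2] at hpf
      simp only at hpf
      have hall : ∀ w ∈ r, w ∈ S := by
        intro w hw
        have := List.all_eq_true.1 hpf w hw
        simpa using this
      have hgd : P.getD p.1 [] = r :: rest := by
        rw [← hp2]
        exact PySem.Dict.getD_of_mem_items P hpi hnd []
      exact hpe ▸ NullE.first p.1 r rest hgd (fun w hw => hS w (hall w hw))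
  have hspec := pvRounds_spec f P.keys
    (fun S => pvSet_prefix_update (expand S) S)
    (fun S h => PySem.Set.nodup_union S (expand S) h)
    (by
      intro S hsub x hx
      rcases (PySem.Set.mem_union S (expand S) x).1 hx with h1 | h1
      · exact hsub h1
      · exact hexpand_sub S h1)
    (fun S => ∀ x ∈ S, NullE P x)
    (by
      intro S hS x hx
      rcases (PySem.Set.mem_union S (expand S) x).1 hx with h1 | h1
      · exact hS x h1
      · exact hexpand_null S hS x h1)
    P.items.length base
    (PySem.Set.nodup_ofList _)
    (by
      intro x hx
      rw [hbase] at hx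
      rw [PySem.Set.mem_ofList] at hx
      obtain ⟨p, hp, hpe⟩ := List.mem_map.1 hx
      exact hpe ▸ List.mem_map.2 ⟨p, (List.mem_filter.1 hp).1, rfl⟩)
    (by
      intro x hx
      rw [hbase, PySem.Set.mem_ofList] at hx
      obtain ⟨p, hp, hpe⟩ := List.mem_map.1 hx
      obtain ⟨hpi, hpf⟩ := List.mem_filter.1 hp
      have hmem : ["$"] ∈ p.2 := by simpa using hpf
      have hgd : P.getD p.1 [] = p.2 :=
        PySem.Dict.getD_of_mem_items P hpi hnd []
      exact hpe ▸ NullE.dollar p.1 (hgd ▸ hmem))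
    (by
      have : P.keys.length = P.items.length := by
        simp [PySem.Dict.keys]
      omega)
  rw [heq]
  constructor
  · exact fun h => hspec.2.2.2.1 z h
  · intro hne
    induction hne with
    | dollar L h =>
      apply hspec.1
      rw [hbase, PySem.Set.mem_ofList]
      have hne2 : P.getD L [] ≠ [] := by intro he; rw [he] at h; simp at h
      rcases hg : P.get? L with _ | v
      · exact absurd (by simp [PySem.Dict.getD_eq_get?_getD, hg]) hne2
      · have hvi : (L, v) ∈ P.items := (PySem.Dict.get?_eq_some_iff_mem_items P L v hnd).1 hg
        have hveq : P.getD L [] = v := by simp [PySem.Dict.getD_eq_get?_getD, hg]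
        refine List.mem_map.2 ⟨(L, v), List.mem_filter.2 ⟨hvi, ?_⟩, rfl⟩
        have h2 : ["$"] ∈ v := hveq ▸ h
        simpa using h2
    | first L r rest h hr ihr =>
      -- fixpoint: the stable set is closed under the first-rhs rule
      have hfix := hspec.2.2.2.2
      rcases hg : P.get? L with _ | v
      · exfalso
        have hthis : P.getD L [] = [] := by simp [PySem.Dict.getD_eq_get?_getD, hg]
        rw [h] at hthis
        simp at hthis
      · have hveq : P.getD L [] = v := by simp [PySem.Dict.getD_eq_get?_getD, hg]
        have hvi : (L, v) ∈ P.items := (PySem.Dict.get?_eq_some_iff_mem_items P L v hnd).1 hg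
        rw [← hfix]
        apply (PySem.Set.mem_union _ _ L).2
        right
        rw [hexp]
        rw [hveq] at h
        subst h
        refine List.mem_map.2 ⟨(L, r :: rest), List.mem_filter.2 ⟨hvi, ?_⟩, rfl⟩
        simp only
        exact List.all_eq_true.2 (fun w hw => by simpa using ihr w hw)

-- ---- direct 'begins with' edges: both sides emit the same symbols per production ----
def pvNuA (P : PVD) : String → Bool := fun z => (pvPrazniZnakovi P).contains z

def PVOnes (d : PySem.Dict (String × String) Int) : Prop :=
  ∀ k, d.get? k = none ∨ d.get? k = some 1

lemma pvPrefix_eq_emit (pr : PySem.Set String) : ∀ (rhs : List String),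
    pvNullablePrefix pr (rhs.filter (fun y => y != "$")) =
      pvEmit (fun z => pr.contains z) rhs := by
  intro rhs
  induction rhs with
  | nil => rfl
  | cons z rest ih =>
    by_cases hz : z = "$"
    · subst hz
      simp only [pvEmit, List.filter_cons, bne_self_eq_false, Bool.false_eq_true, if_false,
        beq_self_eq_true, if_true]
      exact ih
    · have hzb : (z != "$") = true := by simpa using hz
      have hzb2 : (z == "$") = false := by simpa using hz
      simp only [pvEmit, List.filter_cons, hzb, if_pos, hzb2, Bool.false_eq_true, if_false]
      by_cases hc : pr.contains z = true
      · have h2 : PySem.Set.contains pr z = true := hc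
        simp only [pvNullablePrefix, h2, Bool.not_true, Bool.false_eq_true, if_false, if_true]
        rw [ih]
      · have hcf : pr.contains z = false := by simpa using hc
        have h2 : PySem.Set.contains pr z = false := hcf
        simp only [pvNullablePrefix, h2, Bool.not_false, if_true, Bool.false_eq_true, if_false]

lemma pvIzravnoInner_contains (L : String) (prazni : List String) : ∀ (ds : List String)
    (d : PySem.Dict (String × String) Int) (k : String × String),
    ((pvIzravnoInner L prazni ds d).contains k = true ↔
      d.contains k = true ∨ k ∈ (pvEmit (fun z => prazni.contains z) ds).map (fun z => (L, z))) := by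
  intro ds
  induction ds with
  | nil => intro d k; simp [pvIzravnoInner, pvEmit]
  | cons z rest ih =>
    intro d k
    by_cases hz : z = "$"
    · subst hz
      simp only [pvIzravnoInner, pvEmit, bne_self_eq_false, Bool.false_eq_true, if_false,
        beq_self_eq_true, if_true]
      exact ih d k
    · have hzb : (z != "$") = true := by simpa using hz
      have hzb2 : (z == "$") = false := by simpa using hz
      simp only [pvIzravnoInner, pvEmit, hzb, if_pos, hzb2, Bool.false_eq_true, if_false]
      by_cases hc : prazni.contains z = true
      · simp only [hc, Bool.not_true, Bool.false_eq_true, if_false, if_true]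
        rw [ih, PySem.Dict.contains_insert]
        simp only [Bool.or_eq_true, beq_iff_eq, List.map_cons, List.mem_cons]
        tauto
      · have hcf : prazni.contains z = false := by simpa using hc
        simp only [hcf, Bool.not_false, if_true, Bool.false_eq_true, if_false]
        rw [PySem.Dict.contains_insert]
        simp only [Bool.or_eq_true, beq_iff_eq, List.map_cons, List.map_nil, List.mem_cons,
          List.not_mem_nil, or_false]
        tauto

lemma pvIzravnoInner_ones (L : String) (prazni : List String) : ∀ (ds : List String)
    (d : PySem.Dict (String × String) Int), PVOnes d → PVOnes (pvIzravnoInner L prazni ds d) := by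
  intro ds
  induction ds with
  | nil => intro d h; exact h
  | cons z rest ih =>
    intro d h
    have hins : PVOnes (d.insert (L, z) 1) := by
      intro k
      rw [PySem.Dict.get?_insert]
      split
      · right; rfl
      · exact h k
    simp only [pvIzravnoInner]
    split
    · split
      · exact hins
      · exact ih _ hins
    · exact ih _ h

lemma pvIzravnoInner_nodup (L : String) (prazni : List String) : ∀ (ds : List String)
    (d : PySem.Dict (String × String) Int), d.keys.Nodup → (pvIzravnoInner L prazni ds d).keys.Nodup := by
  intro ds
  induction ds with
  | nil => intro d h; exact h
  | cons z rest ih =>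
    intro d h
    simp only [pvIzravnoInner]
    split
    · split
      · exact PySem.Dict.nodup_keys_insert d _ _ h
      · exact ih _ (PySem.Dict.nodup_keys_insert d _ _ h)
    · exact ih _ h

lemma pvIzravnoRow_contains (L : String) (prazni : List String) : ∀ (dss : List (List String))
    (d : PySem.Dict (String × String) Int) (k : String × String),
    ((dss.foldl (fun d ds => pvIzravnoInner L prazni ds d) d).contains k = true ↔
      d.contains k = true ∨ ∃ ds ∈ dss, k ∈ (pvEmit (fun z => prazni.contains z) ds).map (fun z => (L, z))) := by
  intro dss
  induction dss with
  | nil => intro d k; simp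
  | cons ds dss ih =>
    intro d k
    rw [List.foldl_cons, ih, pvIzravnoInner_contains]
    constructor
    · rintro ((h | h) | ⟨ds2, h1, h2⟩)
      · exact Or.inl h
      · exact Or.inr ⟨ds, List.mem_cons_self .., h⟩
      · exact Or.inr ⟨ds2, List.mem_cons_of_mem _ h1, h2⟩
    · rintro (h | ⟨ds2, h1, h2⟩)
      · exact Or.inl (Or.inl h)
      · rcases List.mem_cons.1 h1 with h3 | h3
        · exact Or.inl (Or.inr (h3 ▸ h2))
        · exact Or.inr ⟨ds2, h3, h2⟩

lemma pvIzravno_contains (P : PVD) (a b : String) :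
    ((pvIzravno P).contains (a, b) = true ↔
      ∃ L ∈ P.keys, ∃ ds ∈ P.getD L [],
        (a, b) ∈ (pvEmit (pvNuA P) ds).map (fun z => (L, z))) := by
  unfold pvIzravno
  have hgen : ∀ (ks : List String) (d : PySem.Dict (String × String) Int),
      ((ks.foldl (fun d L => (P.getD L []).foldl (fun d ds => pvIzravnoInner L (pvPrazniZnakovi P) ds d) d) d).contains (a, b) = true ↔
        d.contains (a, b) = true ∨ ∃ L ∈ ks, ∃ ds ∈ P.getD L [],
          (a, b) ∈ (pvEmit (pvNuA P) ds).map (fun z => (L, z))) := by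
    intro ks
    induction ks with
    | nil => intro d; simp
    | cons L ks ih =>
      intro d
      rw [List.foldl_cons, ih, pvIzravnoRow_contains]
      constructor
      · rintro ((h | ⟨ds, h1, h2⟩) | ⟨L2, h1, h2⟩)
        · exact Or.inl h
        · exact Or.inr ⟨L, List.mem_cons_self .., ds, h1, h2⟩
        · exact Or.inr ⟨L2, List.mem_cons_of_mem _ h1, h2⟩
      · rintro (h | ⟨L2, h1, h2⟩)
        · exact Or.inl (Or.inl h)
        · rcases List.mem_cons.1 h1 with h3 | h3
          · exact Or.inl (Or.inr (h3 ▸ h2))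
          · exact Or.inr ⟨L2, h3, h2⟩
  rw [hgen]
  simp [PySem.Dict.contains_empty]

lemma pvIzravno_ones (P : PVD) : PVOnes (pvIzravno P) := by
  unfold pvIzravno
  refine List.foldlRecOn P.keys _ (fun k => Or.inl (PySem.Dict.get?_empty k)) ?_
  intro d hd L _
  exact List.foldlRecOn (P.getD L []) _ hd
    (fun d2 hd2 ds _ => pvIzravnoInner_ones L (pvPrazniZnakovi P) ds d2 hd2)

lemma pvIzravno_nodup (P : PVD) : (pvIzravno P).keys.Nodup := by
  unfold pvIzravno
  refine List.foldlRecOn (motive := fun (d : PySem.Dict (String × String) Int) => d.keys.Nodup) P.keys _ PySem.Dict.nodup_keys_empty ?_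
  intro d hd L _
  exact List.foldlRecOn (motive := fun (d : PySem.Dict (String × String) Int) => d.keys.Nodup) (P.getD L []) _ hd
    (fun d2 hd2 ds _ => pvIzravnoInner_nodup L (pvPrazniZnakovi P) ds d2 hd2)

lemma pvIzravno_iff_DirP (P : PVD) (a b : String) :
    ((pvIzravno P).contains (a, b) = true ↔ DirP P (pvNuA P) a b) := by
  rw [pvIzravno_contains]
  constructor
  · rintro ⟨L, _, ds, h2, h3⟩
    obtain ⟨z, hz1, hz2⟩ := List.mem_map.1 h3
    injection hz2 with hL hzb
    subst hL
    subst hzb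
    exact ⟨ds, h2, hz1⟩
  · rintro ⟨rhs, h1, h2⟩
    have hmem : a ∈ P.keys := pvGetD_ne_nil_mem_keys P a (by
      intro he; rw [he] at h1; simp at h1)
    exact ⟨a, hmem, rhs, h1, List.mem_map.2 ⟨b, h2, rfl⟩⟩

-- ---- A side: the reflexive/transitive saturation loop ----
abbrev PVSt := PySem.Dict (String × String) Int × Bool

def pvC3 (z1 z2 : String) (st : PVSt) (z3 : String) : PVSt :=
  if st.1.get? (z1, z2) == some 1 && st.1.get? (z2, z3) == some 1 then
    if st.1.get? (z1, z3) == none then (st.1.insert (z1, z3) 1, true) else st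
  else st

lemma pvClosurePass_eq (svi : List String) (st : PVSt) :
    pvClosurePass svi st =
      svi.foldl (fun st z1 =>
        svi.foldl (fun st z2 => svi.foldl (pvC3 z1 z2) st) (st.1.insert (z1, z1) 1, st.2)) st := rfl

lemma pvC3_cases (z1 z2 : String) (st : PVSt) (z3 : String) :
    pvC3 z1 z2 st z3 = st ∨
      (pvC3 z1 z2 st z3 = (st.1.insert (z1, z3) 1, true) ∧ st.1.contains (z1, z3) = false) := by
  unfold pvC3
  split
  · split
    · rename_i hnone
      simp only [beq_iff_eq] at hnone
      right
      exact ⟨rfl, (PySem.Dict.get?_eq_none_iff_contains _ _).1 hnone⟩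
    · left; rfl
  · left; rfl

lemma pvKeysLen_insert (d : PySem.Dict (String × String) Int) (k : String × String) (v : Int) :
    (d.insert k v).keys.length = if d.contains k = true then d.keys.length else d.keys.length + 1 := by
  have := PySem.Dict.size_insert d k v
  simpa [PySem.Dict.size, PySem.Dict.keys] using this

-- single-step facts
lemma pvC3_mono (z1 z2 : String) (st : PVSt) (z3 : String) (k : String × String)
    (h : st.1.contains k = true) : (pvC3 z1 z2 st z3).1.contains k = true := by
  rcases pvC3_cases z1 z2 st z3 with hc | hc
  · rw [hc]; exact h
  · rw [hc.1]; rw [PySem.Dict.contains_insert]; simp [h]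

lemma pvC3_flagmono (z1 z2 : String) (st : PVSt) (z3 : String)
    (h : st.2 = true) : (pvC3 z1 z2 st z3).2 = true := by
  rcases pvC3_cases z1 z2 st z3 with hc | hc
  · rw [hc]; exact h
  · rw [hc.1]

lemma pvC3_ones (z1 z2 : String) (st : PVSt) (z3 : String)
    (h : PVOnes st.1) : PVOnes (pvC3 z1 z2 st z3).1 := by
  rcases pvC3_cases z1 z2 st z3 with hc | hc
  · rw [hc]; exact h
  · rw [hc.1]
    intro k
    rw [PySem.Dict.get?_insert]
    split
    · right; rfl
    · exact h k

lemma pvC3_nodup (z1 z2 : String) (st : PVSt) (z3 : String)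
    (h : st.1.keys.Nodup) : (pvC3 z1 z2 st z3).1.keys.Nodup := by
  rcases pvC3_cases z1 z2 st z3 with hc | hc
  · rw [hc]; exact h
  · rw [hc.1]; exact PySem.Dict.nodup_keys_insert _ _ _ h

lemma pvC3_len (z1 z2 : String) (st : PVSt) (z3 : String) :
    st.1.keys.length ≤ (pvC3 z1 z2 st z3).1.keys.length ∧
      ((pvC3 z1 z2 st z3).2 = true → st.2 = true ∨ st.1.keys.length < (pvC3 z1 z2 st z3).1.keys.length) := by
  rcases pvC3_cases z1 z2 st z3 with hc | hc
  · rw [hc]; exact ⟨le_rfl, fun h => Or.inl h⟩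
  · rw [hc.1]
    rw [pvKeysLen_insert, hc.2]
    simp

lemma pvC3_false (z1 z2 : String) (st : PVSt) (z3 : String)
    (h : (pvC3 z1 z2 st z3).2 = false) : pvC3 z1 z2 st z3 = st := by
  rcases pvC3_cases z1 z2 st z3 with hc | hc
  · exact hc
  · rw [hc.1] at h; simp at h

lemma pvContains_of_get?_one (d : PySem.Dict (String × String) Int) (k : String × String)
    (h : d.get? k = some 1) : d.contains k = true := by
  rw [PySem.Dict.contains_eq_isSome_get?, h]; rfl

lemma pvGet?_one_of_contains (d : PySem.Dict (String × String) Int) (k : String × String)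
    (ho : PVOnes d) (h : d.contains k = true) : d.get? k = some 1 := by
  rcases ho k with h2 | h2
  · rw [PySem.Dict.get?_eq_none_iff_contains] at h2
    rw [h] at h2; cases h2
  · exact h2

lemma pvC3_comp (z1 z2 : String) (st : PVSt) (z3 : String) (ho : PVOnes st.1)
    (h12 : st.1.contains (z1, z2) = true) (h23 : st.1.contains (z2, z3) = true) :
    (pvC3 z1 z2 st z3).1.contains (z1, z3) = true := by
  unfold pvC3
  have e12 := pvGet?_one_of_contains st.1 _ ho h12
  have e23 := pvGet?_one_of_contains st.1 _ ho h23
  rw [e12, e23]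
  simp only [beq_self_eq_true, Bool.and_self, if_true]
  split
  · rename_i hnone
    rw [PySem.Dict.contains_insert]
    simp
  · rename_i hsome
    simp only [beq_iff_eq] at hsome
    rw [PySem.Dict.contains_eq_isSome_get?]
    cases hg : st.1.get? (z1, z3) with
    | none => exact absurd hg hsome
    | some v => rfl

-- level 3 (innermost fold over z3)
lemma pvF3_mono (z1 z2 : String) (l : List String) (st : PVSt) (k : String × String)
    (h : st.1.contains k = true) : (l.foldl (pvC3 z1 z2) st).1.contains k = true := by
  refine List.foldlRecOn (motive := fun (st : PVSt) => st.1.contains k = true) l _ h ?_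
  intro st2 h2 z3 _
  exact pvC3_mono z1 z2 st2 z3 k h2

lemma pvF3_flagmono (z1 z2 : String) (l : List String) (st : PVSt)
    (h : st.2 = true) : (l.foldl (pvC3 z1 z2) st).2 = true := by
  refine List.foldlRecOn (motive := fun (st : PVSt) => st.2 = true) l _ h ?_
  intro st2 h2 z3 _
  exact pvC3_flagmono z1 z2 st2 z3 h2

lemma pvF3_inv (z1 z2 : String) (l : List String) (st : PVSt)
    (Inv : PySem.Dict (String × String) Int → Prop)
    (hstep : ∀ (st : PVSt) (z3 : String), z3 ∈ l → Inv st.1 → Inv (pvC3 z1 z2 st z3).1)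
    (h : Inv st.1) : Inv (l.foldl (pvC3 z1 z2) st).1 := by
  refine List.foldlRecOn (motive := fun (st : PVSt) => Inv st.1) l _ h ?_
  intro st2 h2 z3 hz3
  exact hstep st2 z3 hz3 h2

lemma pvF3_false (z1 z2 : String) : ∀ (l : List String) (st : PVSt),
    (l.foldl (pvC3 z1 z2) st).2 = false → l.foldl (pvC3 z1 z2) st = st := by
  intro l
  induction l with
  | nil => intro st h; rfl
  | cons z3 l ih =>
    intro st h
    rw [List.foldl_cons] at h ⊢
    have h2 := ih _ h
    rw [h2] at h ⊢
    exact pvC3_false z1 z2 st z3 h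

lemma pvF3_len (z1 z2 : String) : ∀ (l : List String) (st : PVSt),
    st.1.keys.length ≤ (l.foldl (pvC3 z1 z2) st).1.keys.length ∧
      ((l.foldl (pvC3 z1 z2) st).2 = true →
        st.2 = true ∨ st.1.keys.length < (l.foldl (pvC3 z1 z2) st).1.keys.length) := by
  intro l
  induction l with
  | nil => intro st; exact ⟨le_rfl, fun h => Or.inl h⟩
  | cons z3 l ih =>
    intro st
    rw [List.foldl_cons]
    have hstep := pvC3_len z1 z2 st z3
    have hih := ih (pvC3 z1 z2 st z3)
    refine ⟨le_trans hstep.1 hih.1, fun h => ?_⟩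
    rcases hih.2 h with h2 | h2
    · rcases hstep.2 h2 with h3 | h3
      · exact Or.inl h3
      · exact Or.inr (lt_of_lt_of_le h3 hih.1)
    · exact Or.inr (lt_of_le_of_lt hstep.1 h2)

lemma pvF3_comp (z1 z2 : String) : ∀ (l : List String) (st : PVSt) (z3 : String), z3 ∈ l →
    PVOnes st.1 → st.1.contains (z1, z2) = true → st.1.contains (z2, z3) = true →
    (l.foldl (pvC3 z1 z2) st).1.contains (z1, z3) = true := by
  intro l
  induction l with
  | nil => intro st z3 h; simp at h
  | cons w l ih =>
    intro st z3 hz3 ho h12 h23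
    rw [List.foldl_cons]
    rcases List.mem_cons.1 hz3 with h1 | h1
    · subst h1
      exact pvF3_mono z1 z2 l _ _ (pvC3_comp z1 z2 st z3 ho h12 h23)
    · exact ih _ z3 h1 (pvC3_ones z1 z2 st w ho) (pvC3_mono z1 z2 st w _ h12) (pvC3_mono z1 z2 st w _ h23)

-- level 2 (fold over z2)
lemma pvF2_mono (svi : List String) (z1 : String) (l : List String) (st : PVSt) (k : String × String)
    (h : st.1.contains k = true) :
    (l.foldl (fun st z2 => svi.foldl (pvC3 z1 z2) st) st).1.contains k = true := by
  refine List.foldlRecOn (motive := fun (st : PVSt) => st.1.contains k = true) l _ h ?_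
  intro st2 h2 z2 _
  exact pvF3_mono z1 z2 svi st2 k h2

lemma pvF2_flagmono (svi : List String) (z1 : String) (l : List String) (st : PVSt)
    (h : st.2 = true) : (l.foldl (fun st z2 => svi.foldl (pvC3 z1 z2) st) st).2 = true := by
  refine List.foldlRecOn (motive := fun (st : PVSt) => st.2 = true) l _ h ?_
  intro st2 h2 z2 _
  exact pvF3_flagmono z1 z2 svi st2 h2

lemma pvF2_inv (svi : List String) (z1 : String) (l : List String) (st : PVSt)
    (Inv : PySem.Dict (String × String) Int → Prop)
    (hstep : ∀ (st : PVSt) (z2 z3 : String), z2 ∈ l → z3 ∈ svi → Inv st.1 → Inv (pvC3 z1 z2 st z3).1)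
    (h : Inv st.1) : Inv (l.foldl (fun st z2 => svi.foldl (pvC3 z1 z2) st) st).1 := by
  refine List.foldlRecOn (motive := fun (st : PVSt) => Inv st.1) l _ h ?_
  intro st2 h2 z2 hz2
  exact pvF3_inv z1 z2 svi st2 Inv (fun st3 z3 hz3 h3 => hstep st3 z2 z3 hz2 hz3 h3) h2

lemma pvF2_false (svi : List String) (z1 : String) : ∀ (l : List String) (st : PVSt),
    (l.foldl (fun st z2 => svi.foldl (pvC3 z1 z2) st) st).2 = false →
      l.foldl (fun st z2 => svi.foldl (pvC3 z1 z2) st) st = st := by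
  intro l
  induction l with
  | nil => intro st h; rfl
  | cons z2 l ih =>
    intro st h
    rw [List.foldl_cons] at h ⊢
    have h2 := ih _ h
    rw [h2] at h ⊢
    exact pvF3_false z1 z2 svi st h

lemma pvF2_len (svi : List String) (z1 : String) : ∀ (l : List String) (st : PVSt),
    st.1.keys.length ≤ (l.foldl (fun st z2 => svi.foldl (pvC3 z1 z2) st) st).1.keys.length ∧
      ((l.foldl (fun st z2 => svi.foldl (pvC3 z1 z2) st) st).2 = true →
        st.2 = true ∨ st.1.keys.length < (l.foldl (fun st z2 => svi.foldl (pvC3 z1 z2) st) st).1.keys.length) := by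
  intro l
  induction l with
  | nil => intro st; exact ⟨le_rfl, fun h => Or.inl h⟩
  | cons z2 l ih =>
    intro st
    rw [List.foldl_cons]
    have hstep := pvF3_len z1 z2 svi st
    have hih := ih (svi.foldl (pvC3 z1 z2) st)
    refine ⟨le_trans hstep.1 hih.1, fun h => ?_⟩
    rcases hih.2 h with h2 | h2
    · rcases hstep.2 h2 with h3 | h3
      · exact Or.inl h3
      · exact Or.inr (lt_of_lt_of_le h3 hih.1)
    · exact Or.inr (lt_of_le_of_lt hstep.1 h2)

lemma pvF2_comp (svi : List String) (z1 : String) : ∀ (l : List String) (st : PVSt) (z2 z3 : String),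
    z2 ∈ l → z3 ∈ svi →
    PVOnes st.1 → st.1.contains (z1, z2) = true → st.1.contains (z2, z3) = true →
    (l.foldl (fun st z2 => svi.foldl (pvC3 z1 z2) st) st).1.contains (z1, z3) = true := by
  intro l
  induction l with
  | nil => intro st z2 z3 h; simp at h
  | cons w l ih =>
    intro st z2 z3 hz2 hz3 ho h12 h23
    rw [List.foldl_cons]
    rcases List.mem_cons.1 hz2 with h1 | h1
    · subst h1
      exact pvF2_mono svi z1 l _ _ (pvF3_comp z1 z2 svi st z3 hz3 ho h12 h23)
    · exact ih _ z2 z3 h1 hz3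
        (pvF3_inv z1 w svi st _ (fun st3 z3' _ h3 => pvC3_ones z1 w st3 z3' h3) ho)
        (pvF3_mono z1 w svi st _ h12) (pvF3_mono z1 w svi st _ h23)

-- level 1 (outer fold over z1, with the reflexive insert)
lemma pvF1_mono (svi : List String) (l : List String) (st : PVSt) (k : String × String)
    (h : st.1.contains k = true) :
    (l.foldl (fun st z1 =>
      svi.foldl (fun st z2 => svi.foldl (pvC3 z1 z2) st) (st.1.insert (z1, z1) 1, st.2)) st).1.contains k = true := by
  refine List.foldlRecOn (motive := fun (st : PVSt) => st.1.contains k = true) l _ h ?_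
  intro st2 h2 z1 _
  refine pvF2_mono svi z1 svi _ k ?_
  show (st2.1.insert (z1, z1) 1).contains k = true
  rw [PySem.Dict.contains_insert]
  simp [h2]

lemma pvF1_flagmono (svi : List String) (l : List String) (st : PVSt)
    (h : st.2 = true) :
    (l.foldl (fun st z1 =>
      svi.foldl (fun st z2 => svi.foldl (pvC3 z1 z2) st) (st.1.insert (z1, z1) 1, st.2)) st).2 = true := by
  refine List.foldlRecOn (motive := fun (st : PVSt) => st.2 = true) l _ h ?_
  intro st2 h2 z1 _
  exact pvF2_flagmono svi z1 svi _ h2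

lemma pvF1_inv (svi : List String) (l : List String) (st : PVSt)
    (Inv : PySem.Dict (String × String) Int → Prop)
    (hrefl : ∀ (d : PySem.Dict (String × String) Int) (z1 : String), z1 ∈ l → Inv d → Inv (d.insert (z1, z1) 1))
    (hstep : ∀ (st : PVSt) (z1 z2 z3 : String), z1 ∈ l → z2 ∈ svi → z3 ∈ svi → Inv st.1 → Inv (pvC3 z1 z2 st z3).1)
    (h : Inv st.1) :
    Inv (l.foldl (fun st z1 =>
      svi.foldl (fun st z2 => svi.foldl (pvC3 z1 z2) st) (st.1.insert (z1, z1) 1, st.2)) st).1 := by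
  refine List.foldlRecOn (motive := fun (st : PVSt) => Inv st.1) l _ h ?_
  intro st2 h2 z1 hz1
  exact pvF2_inv svi z1 svi _ Inv (fun st3 z2 z3 hz2 hz3 h3 => hstep st3 z1 z2 z3 hz1 hz2 hz3 h3)
    (hrefl st2.1 z1 hz1 h2)

lemma pvF1_refl (svi : List String) : ∀ (l : List String) (st : PVSt) (z : String), z ∈ l →
    (l.foldl (fun st z1 =>
      svi.foldl (fun st z2 => svi.foldl (pvC3 z1 z2) st) (st.1.insert (z1, z1) 1, st.2)) st).1.contains (z, z) = true := by
  intro l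
  induction l with
  | nil => intro st z h; simp at h
  | cons w l ih =>
    intro st z hz
    rw [List.foldl_cons]
    rcases List.mem_cons.1 hz with h1 | h1
    · subst h1
      refine pvF1_mono svi l _ _ ?_
      refine pvF2_mono svi z svi _ _ ?_
      show (st.1.insert (z, z) 1).contains (z, z) = true
      exact PySem.Dict.contains_insert_self _ _ _
    · exact ih _ z h1

lemma pvF1_false (svi : List String) : ∀ (l : List String) (st : PVSt),
    (l.foldl (fun st z1 =>
      svi.foldl (fun st z2 => svi.foldl (pvC3 z1 z2) st) (st.1.insert (z1, z1) 1, st.2)) st).2 = false →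
    (l.foldl (fun st z1 =>
      svi.foldl (fun st z2 => svi.foldl (pvC3 z1 z2) st) (st.1.insert (z1, z1) 1, st.2)) st).2 = st.2 ∧
    ∀ k, (l.foldl (fun st z1 =>
      svi.foldl (fun st z2 => svi.foldl (pvC3 z1 z2) st) (st.1.insert (z1, z1) 1, st.2)) st).1.contains k = true →
      st.1.contains k = true ∨ ∃ z ∈ l, k = (z, z) := by
  intro l
  induction l with
  | nil => intro st h; exact ⟨rfl, fun k hk => Or.inl hk⟩
  | cons w l ih =>
    intro st h
    rw [List.foldl_cons] at h ⊢
    have hih := ih _ h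
    have hstepflag : (svi.foldl (fun st z2 => svi.foldl (pvC3 w z2) st) (st.1.insert (w, w) 1, st.2)).2 = false := by
      by_contra hc
      rw [Bool.not_eq_false] at hc
      have := pvF1_flagmono svi l _ hc
      rw [h] at this
      cases this
    have hstepeq := pvF2_false svi w svi _ hstepflag
    rw [hstepeq] at hih ⊢
    refine ⟨by simpa using hih.1, fun k hk => ?_⟩
    rcases hih.2 k hk with h2 | h2
    · have h3 : (st.1.insert (w, w) 1).contains k = true := h2
      rw [PySem.Dict.contains_insert] at h3
      rcases (by simpa using h3 : k = (w, w) ∨ st.1.contains k = true) with h4 | h4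
      · exact Or.inr ⟨w, List.mem_cons_self .., h4⟩
      · exact Or.inl h4
    · obtain ⟨z, hz1, hz2⟩ := h2
      exact Or.inr ⟨z, List.mem_cons_of_mem _ hz1, hz2⟩

lemma pvF1_len (svi : List String) : ∀ (l : List String) (st : PVSt),
    st.1.keys.length ≤ (l.foldl (fun st z1 =>
      svi.foldl (fun st z2 => svi.foldl (pvC3 z1 z2) st) (st.1.insert (z1, z1) 1, st.2)) st).1.keys.length ∧
      ((l.foldl (fun st z1 =>
        svi.foldl (fun st z2 => svi.foldl (pvC3 z1 z2) st) (st.1.insert (z1, z1) 1, st.2)) st).2 = true →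
        st.2 = true ∨ st.1.keys.length < (l.foldl (fun st z1 =>
          svi.foldl (fun st z2 => svi.foldl (pvC3 z1 z2) st) (st.1.insert (z1, z1) 1, st.2)) st).1.keys.length) := by
  intro l
  induction l with
  | nil => intro st; exact ⟨le_rfl, fun h => Or.inl h⟩
  | cons z1 l ih =>
    intro st
    rw [List.foldl_cons]
    have hins : st.1.keys.length ≤ (st.1.insert (z1, z1) 1).keys.length := by
      rw [pvKeysLen_insert]
      split
      · exact le_rfl
      · omega
    have hstep := pvF2_len svi z1 svi (st.1.insert (z1, z1) 1, st.2)
    have hih := ih (svi.foldl (fun st z2 => svi.foldl (pvC3 z1 z2) st) (st.1.insert (z1, z1) 1, st.2))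
    refine ⟨le_trans (le_trans hins hstep.1) hih.1, fun h => ?_⟩
    rcases hih.2 h with h2 | h2
    · rcases hstep.2 h2 with h3 | h3
      · exact Or.inl h3
      · exact Or.inr (lt_of_lt_of_le (lt_of_le_of_lt hins h3) hih.1)
    · exact Or.inr (lt_of_le_of_lt (le_trans hins hstep.1) h2)

lemma pvF1_comp (svi : List String) : ∀ (l : List String) (st : PVSt) (z1 z2 z3 : String),
    z1 ∈ l → z2 ∈ svi → z3 ∈ svi →
    PVOnes st.1 → st.1.contains (z1, z2) = true → st.1.contains (z2, z3) = true →
    (l.foldl (fun st z1 =>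
      svi.foldl (fun st z2 => svi.foldl (pvC3 z1 z2) st) (st.1.insert (z1, z1) 1, st.2)) st).1.contains (z1, z3) = true := by
  intro l
  induction l with
  | nil => intro st z1 z2 z3 h; simp at h
  | cons w l ih =>
    intro st z1 z2 z3 hz1 hz2 hz3 ho h12 h23
    rw [List.foldl_cons]
    have hinsones : PVOnes (st.1.insert (w, w) 1) := by
      intro k
      rw [PySem.Dict.get?_insert]
      split
      · right; rfl
      · exact ho k
    have hinsmono : ∀ k, st.1.contains k = true → (st.1.insert (w, w) 1).contains k = true := by
      intro k hk
      rw [PySem.Dict.contains_insert]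
      simp [hk]
    rcases List.mem_cons.1 hz1 with h1 | h1
    · subst h1
      exact pvF1_mono svi l _ _
        (pvF2_comp svi z1 svi (st.1.insert (z1, z1) 1, st.2) z2 z3 hz2 hz3 hinsones
          (hinsmono _ h12) (hinsmono _ h23))
    · exact ih _ z1 z2 z3 h1 hz2 hz3
        (pvF2_inv svi w svi _ PVOnes (fun st3 z2' z3' _ _ h3 => pvC3_ones w z2' st3 z3' h3) hinsones)
        (pvF2_mono svi w svi _ _ (hinsmono _ h12)) (pvF2_mono svi w svi _ _ (hinsmono _ h23))

lemma pvC3_sound (Q : String × String → Prop) (svi : List String)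
    (hQcomp : ∀ z1 z2 z3, z1 ∈ svi → z2 ∈ svi → z3 ∈ svi → Q (z1, z2) → Q (z2, z3) → Q (z1, z3))
    (z1 z2 z3 : String) (hz1 : z1 ∈ svi) (hz2 : z2 ∈ svi) (hz3 : z3 ∈ svi) (st : PVSt)
    (h : ∀ k, st.1.contains k = true → Q k) :
    ∀ k, (pvC3 z1 z2 st z3).1.contains k = true → Q k := by
  unfold pvC3
  split
  · rename_i hcond
    have hcond2 : st.1.get? (z1, z2) = some 1 ∧ st.1.get? (z2, z3) = some 1 := by
      simpa using hcond
    have h12 : st.1.contains (z1, z2) = true := pvContains_of_get?_one st.1 _ hcond2.1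
    have h23 : st.1.contains (z2, z3) = true := pvContains_of_get?_one st.1 _ hcond2.2
    split
    · intro k hk
      have hk2 : (st.1.insert (z1, z3) 1).contains k = true := hk
      rw [PySem.Dict.contains_insert] at hk2
      rcases (by simpa using hk2 : k = (z1, z3) ∨ st.1.contains k = true) with h4 | h4
      · subst h4
        exact hQcomp z1 z2 z3 hz1 hz2 hz3 (h _ h12) (h _ h23)
      · exact h k h4
    · exact h
  · exact h

lemma pvCLoop_spec (svi : List String) (U : List (String × String))
    (hU : ∀ z1 ∈ svi, ∀ z3 ∈ svi, (z1, z3) ∈ U)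
    (Q : String × String → Prop)
    (hQrefl : ∀ z ∈ svi, Q (z, z))
    (hQcomp : ∀ z1 z2 z3, z1 ∈ svi → z2 ∈ svi → z3 ∈ svi → Q (z1, z2) → Q (z2, z3) → Q (z1, z3)) :
    ∀ (fuel : Nat) (d : PySem.Dict (String × String) Int),
      PVOnes d → d.keys.Nodup → (∀ k, d.contains k = true → k ∈ U) → (∀ k, d.contains k = true → Q k) →
      U.length + 1 ≤ fuel + d.keys.length →
      (∀ k, d.contains k = true → (pvClosureLoop svi fuel d).contains k = true) ∧
      PVOnes (pvClosureLoop svi fuel d) ∧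
      (∀ k, (pvClosureLoop svi fuel d).contains k = true → Q k) ∧
      (∀ z ∈ svi, (pvClosureLoop svi fuel d).contains (z, z) = true) ∧
      (∀ z1 z2 z3, z1 ∈ svi → z2 ∈ svi → z3 ∈ svi →
        (pvClosureLoop svi fuel d).contains (z1, z2) = true →
        (pvClosureLoop svi fuel d).contains (z2, z3) = true →
        (pvClosureLoop svi fuel d).contains (z1, z3) = true) := by
  intro fuel
  induction fuel with
  | zero =>
    intro d _ hnd hbd _ hfuel
    exfalso
    have hsub : d.keys ⊆ U := by
      intro k hk
      exact hbd k ((PySem.Dict.contains_iff_mem_keys d k).2 hk)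
    have := pvNodupLen hnd hsub
    omega
  | succ fuel ih =>
    intro d ho hnd hbd hq hfuel
    rw [pvClosureLoop]
    rw [pvClosurePass_eq]
    by_cases hf : (svi.foldl (fun st z1 =>
        svi.foldl (fun st z2 => svi.foldl (pvC3 z1 z2) st) (st.1.insert (z1, z1) 1, st.2)) ((d, false) : PVSt)).2 = true
    · simp only [hf, if_true]
      set r := svi.foldl (fun st z1 =>
        svi.foldl (fun st z2 => svi.foldl (pvC3 z1 z2) st) (st.1.insert (z1, z1) 1, st.2)) ((d, false) : PVSt) with hr
      have hones : PVOnes r.1 := by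
        refine pvF1_inv svi svi (d, false) PVOnes ?_ ?_ ho
        · intro d2 z1 _ h2
          intro k
          rw [PySem.Dict.get?_insert]
          split
          · right; rfl
          · exact h2 k
        · intro st z1 z2 z3 _ _ _ h2
          exact pvC3_ones z1 z2 st z3 h2
      have hnd2 : r.1.keys.Nodup := by
        refine pvF1_inv svi svi (d, false) (fun d2 => d2.keys.Nodup) ?_ ?_ hnd
        · intro d2 z1 _ h2
          exact PySem.Dict.nodup_keys_insert _ _ _ h2
        · intro st z1 z2 z3 _ _ _ h2
          exact pvC3_nodup z1 z2 st z3 h2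
      have hbd2 : ∀ k, r.1.contains k = true → k ∈ U := by
        refine pvF1_inv svi svi (d, false) (fun d2 => ∀ k, d2.contains k = true → k ∈ U) ?_ ?_ hbd
        · intro d2 z1 hz1 h2 k hk
          rw [PySem.Dict.contains_insert] at hk
          rcases (by simpa using hk : k = (z1, z1) ∨ d2.contains k = true) with h4 | h4
          · subst h4; exact hU z1 hz1 z1 hz1
          · exact h2 k h4
        · intro st z1 z2 z3 hz1 _ hz3 h2 k hk
          rcases pvC3_cases z1 z2 st z3 with hc | hc
          · rw [hc] at hk; exact h2 k hk
          · rw [hc.1] at hk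
            have hk2 : (st.1.insert (z1, z3) 1).contains k = true := hk
            rw [PySem.Dict.contains_insert] at hk2
            rcases (by simpa using hk2 : k = (z1, z3) ∨ st.1.contains k = true) with h4 | h4
            · subst h4; exact hU z1 hz1 z3 hz3
            · exact h2 k h4
      have hq2 : ∀ k, r.1.contains k = true → Q k := by
        refine pvF1_inv svi svi (d, false) (fun d2 => ∀ k, d2.contains k = true → Q k) ?_ ?_ hq
        · intro d2 z1 hz1 h2 k hk
          rw [PySem.Dict.contains_insert] at hk
          rcases (by simpa using hk : k = (z1, z1) ∨ d2.contains k = true) with h4 | h4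
          · subst h4; exact hQrefl z1 hz1
          · exact h2 k h4
        · intro st z1 z2 z3 hz1 hz2 hz3 h2
          exact pvC3_sound Q svi hQcomp z1 z2 z3 hz1 hz2 hz3 st h2
      have hgrow : d.keys.length < r.1.keys.length := by
        have := (pvF1_len svi svi ((d, false) : PVSt)).2 hf
        rcases this with h2 | h2
        · cases h2
        · exact h2
      have hih := ih r.1 hones hnd2 hbd2 hq2 (by omega)
      refine ⟨fun k hk => hih.1 k (pvF1_mono svi svi (d, false) k hk), hih.2.1, hih.2.2.1, hih.2.2.2.1, hih.2.2.2.2⟩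
    · rw [Bool.not_eq_true] at hf
      simp only [hf, Bool.false_eq_true, if_false]
      set r := svi.foldl (fun st z1 =>
        svi.foldl (fun st z2 => svi.foldl (pvC3 z1 z2) st) (st.1.insert (z1, z1) 1, st.2)) ((d, false) : PVSt) with hr
      have hmem := pvF1_false svi svi (d, false) hf
      refine ⟨fun k hk => pvF1_mono svi svi (d, false) k hk, ?_, ?_, ?_, ?_⟩
      · refine pvF1_inv svi svi (d, false) PVOnes ?_ ?_ ho
        · intro d2 z1 _ h2
          intro k
          rw [PySem.Dict.get?_insert]
          split
          · right; rfl
          · exact h2 k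
        · intro st z1 z2 z3 _ _ _ h2
          exact pvC3_ones z1 z2 st z3 h2
      · refine pvF1_inv svi svi (d, false) (fun d2 => ∀ k, d2.contains k = true → Q k) ?_ ?_ hq
        · intro d2 z1 hz1 h2 k hk
          rw [PySem.Dict.contains_insert] at hk
          rcases (by simpa using hk : k = (z1, z1) ∨ d2.contains k = true) with h4 | h4
          · subst h4; exact hQrefl z1 hz1
          · exact h2 k h4
        · intro st z1 z2 z3 hz1 hz2 hz3 h2
          exact pvC3_sound Q svi hQcomp z1 z2 z3 hz1 hz2 hz3 st h2
      · intro z hz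
        exact pvF1_refl svi svi (d, false) z hz
      · intro z1 z2 z3 hz1 hz2 hz3 h12 h23
        rcases hmem.2 _ h12 with hm12 | hm12
        · rcases hmem.2 _ h23 with hm23 | hm23
          · exact pvF1_comp svi svi (d, false) z1 z2 z3 hz1 hz2 hz3 ho hm12 hm23
          · obtain ⟨z, _, hzeq⟩ := hm23
            injection hzeq with he1 he2
            have h23eq : z2 = z3 := by rw [he1, he2]
            rw [← h23eq]
            exact h12
        · obtain ⟨z, _, hzeq⟩ := hm12
          injection hzeq with he1 he2
          have hz1z2 : z1 = z2 := by rw [he1, he2]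
          subst hz1z2
          exact h23

lemma pvUpdateEmpty (d : PySem.Dict (String × String) Int) (h : d.keys.Nodup) :
    PySem.Dict.update PySem.Dict.empty d.items = d := by
  apply PySem.Dict.ext
  show (d.items.foldl (fun acc p => acc.insert p.1 p.2) PySem.Dict.empty).items = d.items
  have := PySem.Dict.items_foldl_insert_fresh d.items (fun p => p.1) (fun p => p.2) PySem.Dict.empty
    (fun a _ => PySem.Dict.contains_empty a.1) (by simpa [PySem.Dict.keys] using h)
  simpa using this

theorem pvTablica_iff (P : PVD) (svi : List String) (a b : String) (ha : a ∈ svi) (hb : b ∈ svi) :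
    ((pvTablicaZapocinje P svi).get? (a, b) = some 1 ↔ ReachR P (pvNuA P) svi a b) := by
  have hzz : pvTablicaZapocinje P svi =
      pvClosureLoop svi ((pvIzravno P).keys.length + svi.length * svi.length + 1) (pvIzravno P) := by
    rw [show pvTablicaZapocinje P svi = pvClosureLoop svi
        ((pvIzravno P).keys.length + svi.length * svi.length + 1)
        (PySem.Dict.update PySem.Dict.empty (pvIzravno P).items) from rfl]
    rw [pvUpdateEmpty (pvIzravno P) (pvIzravno_nodup P)]
  have hQstep : ∀ x y, x ∈ svi → y ∈ svi →
      (DirP P (pvNuA P) x y ∨ (x ∈ svi ∧ y ∈ svi ∧ ReachR P (pvNuA P) svi x y)) →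
      ReachR P (pvNuA P) svi x y := by
    intro x y hx hy h
    rcases h with h | h
    · exact Relation.ReflTransGen.single ⟨hx, hy, h⟩
    · exact h.2.2
  have hspec := pvCLoop_spec svi
    ((pvIzravno P).keys ++ svi.flatMap (fun x => svi.map (fun y => (x, y))))
    (by
      intro z1 hz1 z3 hz3
      exact List.mem_append.2 (Or.inr (List.mem_flatMap.2 ⟨z1, hz1, List.mem_map.2 ⟨z3, hz3, rfl⟩⟩)))
    (fun k => DirP P (pvNuA P) k.1 k.2 ∨ (k.1 ∈ svi ∧ k.2 ∈ svi ∧ ReachR P (pvNuA P) svi k.1 k.2))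
    (fun z hz => Or.inr ⟨hz, hz, Relation.ReflTransGen.refl⟩)
    (by
      intro z1 z2 z3 hz1 hz2 hz3 hq1 hq2
      exact Or.inr ⟨hz1, hz3, (hQstep z1 z2 hz1 hz2 hq1).trans (hQstep z2 z3 hz2 hz3 hq2)⟩)
    ((pvIzravno P).keys.length + svi.length * svi.length + 1) (pvIzravno P)
    (pvIzravno_ones P) (pvIzravno_nodup P)
    (by
      intro k hk
      exact List.mem_append.2 (Or.inl ((PySem.Dict.contains_iff_mem_keys _ k).1 hk)))
    (by
      intro k hk
      left
      exact (pvIzravno_iff_DirP P k.1 k.2).1 hk)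
    (by
      have hflen : (svi.flatMap (fun x => svi.map (fun y => (x, y)))).length = svi.length * svi.length := by
        rw [List.length_flatMap]
        have : (svi.map fun x => ((svi.map (fun y => (x, y))).length)) = svi.map fun _ => svi.length := by
          simp
        simp
      rw [List.length_append, hflen]
      omega)
  rw [hzz]
  constructor
  · intro h
    have hc := pvContains_of_get?_one _ _ h
    have hq := hspec.2.2.1 _ hc
    exact hQstep a b ha hb hq
  · intro hre
    have hcont : ∀ b', ReachR P (pvNuA P) svi a b' →
        (pvClosureLoop svi ((pvIzravno P).keys.length + svi.length * svi.length + 1) (pvIzravno P)).contains (a, b') = true := by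
      intro b' hre'
      induction hre' with
      | refl => exact hspec.2.2.2.1 a ha
      | tail h1 h2 ih =>
        rename_i bmid bend
        have hdir : (pvIzravno P).contains (bmid, bend) = true :=
          (pvIzravno_iff_DirP P bmid bend).2 h2.2.2
        have hdir2 := hspec.1 _ hdir
        exact hspec.2.2.2.2 a bmid bend ha h2.1 h2.2.1 ih hdir2
    exact pvGet?_one_of_contains _ _ hspec.2.1 (hcont b hre)

-- ---- B side: edges and bounded-round reachability ----
lemma pvNu_eq (P : PVD) (hnd : P.keys.Nodup) :
    (fun z => (pvPrazniAlt P.items).contains z) = pvNuA P := by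
  funext z
  have hA := pvPrazniA_iff P hnd z
  have hB := pvPrazniB_iff P hnd z
  by_cases hm : NullE P z
  · have b1 : z ∈ pvPrazniAlt P.items := hB.2 hm
    have b2 : z ∈ pvPrazniZnakovi P := hA.2 hm
    simp [pvNuA, b1, b2]
  · have b1 : z ∉ pvPrazniAlt P.items := fun h => hm (hB.1 h)
    have b2 : z ∉ pvPrazniZnakovi P := fun h => hm (hA.1 h)
    simp [pvNuA, b1, b2]

lemma pvEdges_mem (P : PVD) (hnd : P.keys.Nodup) (pr : PySem.Set String) (a b : String) :
    ((a, b) ∈ pvEdges P.items pr ↔ DirP P (fun z => pr.contains z) a b) := by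
  unfold pvEdges
  rw [PySem.Set.mem_ofList]
  rw [List.mem_flatMap]
  constructor
  · rintro ⟨p, hp, hin⟩
    rw [List.mem_flatMap] at hin
    obtain ⟨rhs, hrhs, hin2⟩ := hin
    rw [pvPrefix_eq_emit] at hin2
    obtain ⟨z, hz, hze⟩ := List.mem_map.1 hin2
    injection hze with he1 he2
    subst he1
    subst he2
    have hgd : P.getD p.1 [] = p.2 := PySem.Dict.getD_of_mem_items P hp hnd []
    exact ⟨rhs, hgd ▸ hrhs, hz⟩
  · rintro ⟨rhs, hrhs, hb⟩
    have hne : P.getD a [] ≠ [] := by intro he; rw [he] at hrhs; cases hrhs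
    rcases hg : P.get? a with _ | v
    · exact absurd (by simp [PySem.Dict.getD_eq_get?_getD, hg]) hne
    · have hveq : P.getD a [] = v := by simp [PySem.Dict.getD_eq_get?_getD, hg]
      have hvi : (a, v) ∈ P.items := (PySem.Dict.get?_eq_some_iff_mem_items P a v hnd).1 hg
      refine ⟨(a, v), hvi, ?_⟩
      rw [List.mem_flatMap]
      refine ⟨rhs, hveq ▸ hrhs, ?_⟩
      rw [pvPrefix_eq_emit]
      exact List.mem_map.2 ⟨b, hb, rfl⟩

lemma pvReach_eq_iter (edges2 : PySem.Set (String × String)) (n : Nat) (s : String) :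
    pvReach edges2 n s =
      (fun (S : PySem.Set String) => PySem.Set.union S
        ((edges2.filter (fun e => S.contains e.1)).map (·.2)))^[n] (PySem.Set.ofList [s]) := by
  unfold pvReach
  rw [pvRangeFold]

lemma pvReach_iff (P : PVD) (svi : List String) (edges2 : PySem.Set (String × String))
    (hedges : ∀ a b, ((a, b) ∈ edges2 ↔ StepR P (pvNuA P) svi a b))
    (s : String) (hs : s ∈ svi) (t : String) :
    (t ∈ pvReach edges2 (PySem.Set.ofList svi).length s ↔ ReachR P (pvNuA P) svi s t) := by
  rw [pvReach_eq_iter]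
  set f := fun (S : PySem.Set String) => PySem.Set.union S
    ((edges2.filter (fun e => S.contains e.1)).map (·.2)) with hfdef
  have hspec := pvRounds_spec f (PySem.Set.ofList svi)
    (fun S => pvSet_prefix_update _ S)
    (fun S h => PySem.Set.nodup_union _ _ h)
    (by
      intro S hsub x hx
      rcases (PySem.Set.mem_union _ _ x).1 hx with h1 | h1
      · exact hsub h1
      · obtain ⟨e, he, hee⟩ := List.mem_map.1 h1
        have he2 := List.mem_filter.1 he
        have hst := (hedges e.1 e.2).1 he2.1
        rw [PySem.Set.mem_ofList]
        exact hee ▸ hst.2.1)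
    (fun S => ∀ x ∈ S, ReachR P (pvNuA P) svi s x)
    (by
      intro S hS x hx
      rcases (PySem.Set.mem_union _ _ x).1 hx with h1 | h1
      · exact hS x h1
      · obtain ⟨e, he, hee⟩ := List.mem_map.1 h1
        have he2 := List.mem_filter.1 he
        have hst := (hedges e.1 e.2).1 he2.1
        have hr1 : ReachR P (pvNuA P) svi s e.1 := by
          apply hS
          have := he2.2
          simpa using this
        exact hee ▸ hr1.tail hst)
    (PySem.Set.ofList svi).length (PySem.Set.ofList [s])
    (by simp)
    (by
      intro x hx
      rw [PySem.Set.mem_ofList] at hx ⊢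
      simp at hx
      subst hx
      exact hs)
    (by
      intro x hx
      rw [PySem.Set.mem_ofList] at hx
      simp at hx
      subst hx
      exact Relation.ReflTransGen.refl)
    (by simp)
  constructor
  · exact fun h => hspec.2.2.2.1 t h
  · intro hre
    induction hre with
    | refl =>
      apply hspec.1
      rw [PySem.Set.mem_ofList]
      simp
    | tail h1 h2 ih =>
      rename_i bmid bend
      rw [← hspec.2.2.2.2]
      apply (PySem.Set.mem_union _ _ bend).2
      right
      refine List.mem_map.2 ⟨(bmid, bend), List.mem_filter.2 ⟨(hedges bmid bend).2 h2, ?_⟩, rfl⟩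
      simpa using ih

-- ===== VERDICT (by name: the statement is the Claim_ definition above) =====
theorem zapocinjeZaZnakove_spec : Claim_equal_zapocinjeZaZnakove := by
  intro produkcije nezavrsniZnakovi zavrsniZnakovi pocetniZnak _
  unfold Spec_zapocinjeZaZnakove
  have hnd : (PySem.Dict.ofList produkcije).keys.Nodup := PySem.Dict.nodup_keys_ofList produkcije
  show ((nezavrsniZnakovi ++ zavrsniZnakovi ++ ["$"] ++ [pocetniZnak]).foldl (fun out z1 =>
      out.insert z1 (zavrsniZnakovi.foldl (fun acc z2 =>
        if (pvTablicaZapocinje (PySem.Dict.ofList produkcije)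
            (nezavrsniZnakovi ++ zavrsniZnakovi ++ ["$"] ++ [pocetniZnak])).get? (z1, z2) == some 1
        then acc ++ [z2] else acc) []))
      PySem.Dict.empty).items
    = ((nezavrsniZnakovi ++ zavrsniZnakovi ++ ["$"] ++ [pocetniZnak]).foldl (fun out s =>
      out.insert s (zavrsniZnakovi.filter (fun t =>
        (pvReach (PySem.Set.ofList
            ((pvEdges (PySem.Dict.ofList produkcije).items
                (pvPrazniAlt (PySem.Dict.ofList produkcije).items)).filter
              (fun e =>
                (PySem.Set.ofList (nezavrsniZnakovi ++ zavrsniZnakovi ++ ["$"] ++ [pocetniZnak])).contains e.1 &&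
                (PySem.Set.ofList (nezavrsniZnakovi ++ zavrsniZnakovi ++ ["$"] ++ [pocetniZnak])).contains e.2)))
          (PySem.Set.ofList (nezavrsniZnakovi ++ zavrsniZnakovi ++ ["$"] ++ [pocetniZnak])).length s).contains t)))
      PySem.Dict.empty).items
  set svi := nezavrsniZnakovi ++ zavrsniZnakovi ++ ["$"] ++ [pocetniZnak] with hsvi
  set P := PySem.Dict.ofList produkcije with hP
  set edges2 : PySem.Set (String × String) := PySem.Set.ofList
    ((pvEdges P.items (pvPrazniAlt P.items)).filter
      (fun e => (PySem.Set.ofList svi).contains e.1 && (PySem.Set.ofList svi).contains e.2)) with hedges2def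
  have hedges : ∀ a b, ((a, b) ∈ edges2 ↔ StepR P (pvNuA P) svi a b) := by
    intro a b
    rw [hedges2def, PySem.Set.mem_ofList, List.mem_filter]
    constructor
    · rintro ⟨h1, h2⟩
      have hd := (pvEdges_mem P hnd _ a b).1 h1
      rw [pvNu_eq P hnd] at hd
      have h3 : a ∈ svi ∧ b ∈ svi := by
        have h4 := (Bool.and_eq_true _ _).mp h2
        constructor
        · have := h4.1
          rw [← PySem.Set.mem_ofList svi a]
          simpa using this
        · have := h4.2
          rw [← PySem.Set.mem_ofList svi b]
          simpa using this
      exact ⟨h3.1, h3.2, hd⟩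
    · rintro ⟨ha, hb, hd⟩
      rw [← pvNu_eq P hnd] at hd
      refine ⟨(pvEdges_mem P hnd _ a b).2 hd, ?_⟩
      have ha2 : (PySem.Set.ofList svi).contains a = true := by
        have := (PySem.Set.mem_ofList svi a).2 ha
        simpa using this
      have hb2 : (PySem.Set.ofList svi).contains b = true := by
        have := (PySem.Set.mem_ofList svi b).2 hb
        simpa using this
      rw [ha2, hb2]
      rfl
  refine congrArg PySem.Dict.items ?_
  refine PySem.List.foldl_congr_mem svi _ _ PySem.Dict.empty ?_
  intro acc z1 hz1
  refine congrArg (acc.insert z1) ?_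
  rw [PySem.List.foldl_append_if_eq_filter
    (fun z2 => (pvTablicaZapocinje P svi).get? (z1, z2) == some 1) zavrsniZnakovi []]
  rw [List.nil_append]
  refine List.filter_congr ?_
  intro t ht
  have htv : t ∈ svi := by
    rw [hsvi]
    simp [ht]
  have hA := pvTablica_iff P svi z1 t hz1 htv
  have hB := pvReach_iff P svi edges2 hedges z1 hz1 t
  apply Bool.coe_iff_coe.mp
  constructor
  · intro h
    have h2 : (pvTablicaZapocinje P svi).get? (z1, t) = some 1 := by simpa using h
    have h3 := hB.2 (hA.1 h2)
    simpa using h3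
  · intro h
    have h2 : t ∈ pvReach edges2 (PySem.Set.ofList svi).length z1 := by simpa using h
    have h3 := hA.2 (hB.1 h2)
    simpa using h3
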